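-- pv_equiv track=rewrite | github.com/abdallahdataguy/Excel_BI_Challenges | Excel_Challenge_440_V2.py | sum_of_two_squares
-- ===== SOURCE A (Python) =====
-- def sum_of_two_squares(start, end):
--     values =  []
--     for i in range(1, end + 1):
--         for j in [n for n in range(1, end + 1) if n != i]:
--             total = i ** 2 + j ** 2
--             if start <= total <= end:
--                 values.append(total)
--     return sorted(list(set(values)))
-- ===== SOURCE B (Python) =====
-- def sum_of_two_squares(start, end):
--     res = set()
--     i = 1
--     while i * i + (i + 1) * (i + 1) <= end:
--         j = i + 1
--         while i * i + j * j <= end: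
--             t = i * i + j * j
--             if t >= start:
--                 res.add(t)
--             j += 1
--         i += 1
--     return sorted(res)
-- ===== Notes on version B (the rewrite author's own statement) =====
-- stated objective: faster
-- what changed: Instead of scanning all ordered pairs (i,j) in range(1,end+1)^2 and filtering sums into a list then deduplicating, B walks only the ordered pairs i<j whose sum of squares is <= end, using while-loops bounded by i*i+j*j<=end, adding qualifying sums directly to a set.
import Mathlib
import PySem

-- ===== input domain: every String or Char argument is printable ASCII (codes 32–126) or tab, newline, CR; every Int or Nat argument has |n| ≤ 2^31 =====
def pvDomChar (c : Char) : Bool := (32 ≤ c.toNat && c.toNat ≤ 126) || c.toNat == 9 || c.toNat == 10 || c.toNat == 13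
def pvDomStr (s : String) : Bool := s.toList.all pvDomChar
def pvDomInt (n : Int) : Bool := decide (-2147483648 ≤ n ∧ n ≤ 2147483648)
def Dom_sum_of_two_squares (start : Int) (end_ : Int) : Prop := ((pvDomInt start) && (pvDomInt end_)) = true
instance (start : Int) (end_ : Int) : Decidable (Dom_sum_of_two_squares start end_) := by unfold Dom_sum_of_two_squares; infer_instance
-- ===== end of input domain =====

-- B replaces A's double scan over range(1, end+1) by two while-loops that only
-- visit ordered pairs i < j with i² + j² ≤ end; same sorted distinct sums.

-- ===== PORT A =====
def sum_of_two_squares (start : Int) (end_ : Int) : List Int :=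
  let values : List Int :=
    (PySem.List.pyRange 1 (end_ + 1) 1).foldl (fun values i =>
      ((PySem.List.pyRange 1 (end_ + 1) 1).filter (fun n => n != i)).foldl (fun values j =>
        let total := i ^ 2 + j ^ 2
        if start ≤ total ∧ total ≤ end_ then values ++ [total] else values) values) []
  PySem.List.sorted (PySem.Set.ofList values) (fun x => x) false

-- ===== PORT B =====
-- every Int j satisfies j ≤ j*j; cited by the ports' decreasing_by
theorem pv_le_mul_self (j : Int) : j ≤ j * j := by
  rcases le_total 0 j with h | h
  · nlinarith
  · nlinarith [mul_self_nonneg j]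

-- B's inner loop: 'while i*i + j*j <= end: ... j += 1'
def pvJ (start end_ i j : Int) (res : PySem.Set Int) : PySem.Set Int :=
  if h : i * i + j * j ≤ end_ then
    let t := i * i + j * j
    pvJ start end_ i (j + 1) (if start ≤ t then PySem.Set.add res t else res)
  else res
termination_by (end_ + 1 - j).toNat
decreasing_by
  have h1 := pv_le_mul_self j
  have h2 := mul_self_nonneg i
  omega

-- B's outer loop: 'while i*i + (i+1)*(i+1) <= end: ... i += 1'
def pvI (start end_ i : Int) (res : PySem.Set Int) : PySem.Set Int :=
  if h : i * i + (i + 1) * (i + 1) ≤ end_ then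
    pvI start end_ (i + 1) (pvJ start end_ i (i + 1) res)
  else res
termination_by (end_ + 1 - i).toNat
decreasing_by
  have h1 := pv_le_mul_self i
  have h2 := mul_self_nonneg (i + 1)
  omega

def sum_of_two_squares_alt (start : Int) (end_ : Int) : List Int :=
  PySem.List.sorted (pvI start end_ 1 PySem.Set.empty) (fun x => x) false

-- ===== PRECONDITION & SPEC =====
def Spec_sum_of_two_squares (start : Int) (end_ : Int) (out : List Int) : Prop := out = sum_of_two_squares_alt start end_
instance (start : Int) (end_ : Int) (out : List Int) : Decidable (Spec_sum_of_two_squares start end_ out) := by unfold Spec_sum_of_two_squares; infer_instance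

-- ===== CLAIM (what is proved, stated in full; the proofs are below) =====
def Claim_equal_sum_of_two_squares : Prop := ∀ (start : Int) (end_ : Int), Dom_sum_of_two_squares start end_ → Spec_sum_of_two_squares start end_ (sum_of_two_squares start end_)

-- ===== LEMMAS AND PROOFS =====

-- membership in B's inner loop result (n bounds the remaining fuel)
theorem mem_pvJ (start end_ i : Int) : ∀ (n : Nat) (j : Int) (res : PySem.Set Int) (x : Int),
    (end_ + 1 - j).toNat ≤ n → 1 ≤ j →
    (x ∈ pvJ start end_ i j res ↔
      x ∈ res ∨ ∃ b, j ≤ b ∧ i * i + b * b ≤ end_ ∧ start ≤ i * i + b * b ∧ x = i * i + b * b) := by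
  intro n
  induction n with
  | zero =>
    intro j res x hn hj
    have hg : ¬ (i * i + j * j ≤ end_) := by
      have := pv_le_mul_self j; have := mul_self_nonneg i; omega
    rw [pvJ, dif_neg hg]
    constructor
    · exact Or.inl
    · rintro (h | ⟨b, hb, hle, _, _⟩)
      · exact h
      · exfalso
        have h1 := pv_le_mul_self b
        have h2 := mul_self_nonneg i
        omega
  | succ n ih =>
    intro j res x hn hj
    rw [pvJ]
    split_ifs with hg
    · have hjend : j ≤ end_ := by
        have := pv_le_mul_self j; have := mul_self_nonneg i; omega
      rw [ih (j + 1) _ x (by omega) (by omega)]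
      have hmem : x ∈ (if start ≤ i * i + j * j then PySem.Set.add res (i * i + j * j) else res) ↔
          x ∈ res ∨ (start ≤ i * i + j * j ∧ x = i * i + j * j) := by
        split_ifs with hs
        · rw [PySem.Set.mem_add]; tauto
        · tauto
      rw [hmem]
      constructor
      · rintro ((h | ⟨hs, hx⟩) | ⟨b, hb, h1, h2, h3⟩)
        · exact Or.inl h
        · exact Or.inr ⟨j, le_refl j, hg, hs, hx⟩
        · exact Or.inr ⟨b, by omega, h1, h2, h3⟩
      · rintro (h | ⟨b, hb, h1, h2, h3⟩)
        · exact Or.inl (Or.inl h)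
        · rcases eq_or_lt_of_le hb with rfl | hlt
          · exact Or.inl (Or.inr ⟨h2, h3⟩)
          · exact Or.inr ⟨b, by omega, h1, h2, h3⟩
    · constructor
      · exact Or.inl
      · rintro (h | ⟨b, hb, h1, h2, h3⟩)
        · exact h
        · exfalso
          have : j * j ≤ b * b := mul_le_mul hb hb (by omega) (by omega)
          omega

-- membership in B's outer loop result
theorem mem_pvI (start end_ : Int) : ∀ (n : Nat) (i : Int) (res : PySem.Set Int) (x : Int),
    (end_ + 1 - i).toNat ≤ n → 1 ≤ i →
    (x ∈ pvI start end_ i res ↔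
      x ∈ res ∨ ∃ a b, i ≤ a ∧ a < b ∧ a * a + b * b ≤ end_ ∧ start ≤ a * a + b * b ∧ x = a * a + b * b) := by
  intro n
  induction n with
  | zero =>
    intro i res x hn hi
    have hg : ¬ (i * i + (i + 1) * (i + 1) ≤ end_) := by
      have := pv_le_mul_self i; have := mul_self_nonneg (i + 1); omega
    rw [pvI, dif_neg hg]
    constructor
    · exact Or.inl
    · rintro (h | ⟨a, b, ha, hab, hle, _, _⟩)
      · exact h
      · exfalso
        have h1 := pv_le_mul_self a
        have h2 := mul_self_nonneg b
        omega
  | succ n ih =>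
    intro i res x hn hi
    rw [pvI]
    split_ifs with hg
    · have hiend : i ≤ end_ := by
        have := pv_le_mul_self i; have := mul_self_nonneg (i + 1); omega
      rw [ih (i + 1) _ x (by omega) (by omega),
        mem_pvJ start end_ i (end_ + 1 - (i + 1)).toNat (i + 1) res x le_rfl (by omega)]
      constructor
      · rintro ((h | ⟨b, hb, h1, h2, h3⟩) | ⟨a, b, ha, hab, h1, h2, h3⟩)
        · exact Or.inl h
        · exact Or.inr ⟨i, b, le_refl i, by omega, h1, h2, h3⟩
        · exact Or.inr ⟨a, b, by omega, hab, h1, h2, h3⟩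
      · rintro (h | ⟨a, b, ha, hab, h1, h2, h3⟩)
        · exact Or.inl (Or.inl h)
        · rcases eq_or_lt_of_le ha with rfl | hlt
          · exact Or.inl (Or.inr ⟨b, by omega, by linarith [h1], h2, h3⟩)
          · exact Or.inr ⟨a, b, by omega, hab, h1, h2, h3⟩
    · constructor
      · exact Or.inl
      · rintro (h | ⟨a, b, ha, hab, h1, h2, h3⟩)
        · exact h
        · exfalso
          have hia : i * i ≤ a * a := mul_le_mul ha ha (by omega) (by omega)
          have hib : (i + 1) * (i + 1) ≤ b * b := by
            have : i + 1 ≤ b := by omega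
            exact mul_le_mul this this (by omega) (by omega)
          omega

theorem nodup_pvJ (start end_ i : Int) : ∀ (n : Nat) (j : Int) (res : PySem.Set Int),
    (end_ + 1 - j).toNat ≤ n → res.Nodup → (pvJ start end_ i j res).Nodup := by
  intro n
  induction n with
  | zero =>
    intro j res hn hres
    rw [pvJ]
    split_ifs with hg
    · exfalso
      have := pv_le_mul_self j; have := mul_self_nonneg i
      omega
    · exact hres
  | succ n ih =>
    intro j res hn hres
    rw [pvJ]
    split_ifs with hg
    · have hjend : j ≤ end_ := by
        have := pv_le_mul_self j; have := mul_self_nonneg i; omega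
      apply ih (j + 1) _ (by omega)
      split_ifs with hs
      · exact PySem.Set.nodup_add _ _ hres
      · exact hres
    · exact hres

theorem nodup_pvI (start end_ : Int) : ∀ (n : Nat) (i : Int) (res : PySem.Set Int),
    (end_ + 1 - i).toNat ≤ n → res.Nodup → (pvI start end_ i res).Nodup := by
  intro n
  induction n with
  | zero =>
    intro i res hn hres
    rw [pvI]
    split_ifs with hg
    · exfalso
      have := pv_le_mul_self i; have := mul_self_nonneg (i + 1)
      omega
    · exact hres
  | succ n ih =>
    intro i res hn hres
    rw [pvI]
    split_ifs with hg
    · have : i ≤ end_ := by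
        have := pv_le_mul_self i; have := mul_self_nonneg (i + 1); omega
      exact ih (i + 1) _ (by omega)
        (nodup_pvJ start end_ i (end_ + 1 - (i + 1)).toNat (i + 1) res le_rfl hres)
    · exact hres

-- membership in the list A accumulates
theorem mem_valuesA (start end_ x : Int) :
    (x ∈ (PySem.List.pyRange 1 (end_ + 1) 1).foldl (fun values i =>
      ((PySem.List.pyRange 1 (end_ + 1) 1).filter (fun n => n != i)).foldl (fun values j =>
        let total := i ^ 2 + j ^ 2
        if start ≤ total ∧ total ≤ end_ then values ++ [total] else values) values) ([] : List Int)) ↔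
    ∃ i j, 1 ≤ i ∧ i ≤ end_ ∧ 1 ≤ j ∧ j ≤ end_ ∧ j ≠ i ∧
      start ≤ i ^ 2 + j ^ 2 ∧ i ^ 2 + j ^ 2 ≤ end_ ∧ x = i ^ 2 + j ^ 2 := by
  simp only [PySem.List.foldl_append_ite, PySem.List.foldl_append_eq_flatMap,
    List.nil_append, List.mem_flatMap, List.mem_map, List.mem_filter,
    PySem.List.mem_pyRange_one, decide_eq_true_eq, bne_iff_ne]
  constructor
  · rintro ⟨i, ⟨hi1, hi2⟩, j, ⟨⟨⟨hj1, hj2⟩, hne⟩, hp⟩, hx⟩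
    exact ⟨i, j, hi1, by omega, hj1, by omega, hne, hp.1, hp.2, hx.symm⟩
  · rintro ⟨i, j, hi1, hi2, hj1, hj2, hne, h1, h2, hx⟩
    exact ⟨i, ⟨hi1, by omega⟩, j, ⟨⟨⟨hj1, by omega⟩, hne⟩, h1, h2⟩, hx.symm⟩

-- A's unordered pairs i ≠ j in [1,end] give the same sums as B's ordered pairs a < b
theorem pv_bridge (start end_ x : Int) :
    (∃ i j, 1 ≤ i ∧ i ≤ end_ ∧ 1 ≤ j ∧ j ≤ end_ ∧ j ≠ i ∧
      start ≤ i ^ 2 + j ^ 2 ∧ i ^ 2 + j ^ 2 ≤ end_ ∧ x = i ^ 2 + j ^ 2) ↔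
    (∃ a b, 1 ≤ a ∧ a < b ∧ a * a + b * b ≤ end_ ∧ start ≤ a * a + b * b ∧ x = a * a + b * b) := by
  constructor
  · rintro ⟨i, j, hi1, hi2, hj1, hj2, hne, h1, h2, hx⟩
    rcases lt_trichotomy i j with h | h | h
    · exact ⟨i, j, hi1, h, by nlinarith, by nlinarith, by nlinarith⟩
    · exact absurd h.symm hne
    · exact ⟨j, i, hj1, h, by nlinarith, by nlinarith, by nlinarith⟩
  · rintro ⟨a, b, ha, hab, hle, hst, hx⟩
    have h1 := pv_le_mul_self a
    have h2 := pv_le_mul_self b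
    have h3 := mul_self_nonneg a
    have h4 := mul_self_nonneg b
    exact ⟨a, b, ha, by omega, by omega, by omega, by omega, by nlinarith, by nlinarith, by nlinarith⟩

-- ===== VERDICT (by name: the statement is the Claim_ definition above) =====
theorem sum_of_two_squares_spec : Claim_equal_sum_of_two_squares := by
  intro start end_ _
  unfold Spec_sum_of_two_squares sum_of_two_squares sum_of_two_squares_alt
  apply PySem.List.sorted_eq_sorted_of_perm _ _ _ (fun _ _ h => h)
  apply (List.perm_ext_iff_of_nodup (PySem.Set.nodup_ofList _)
    (nodup_pvI start end_ (end_ + 1 - 1).toNat 1 PySem.Set.empty le_rfl List.nodup_nil)).mpr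
  intro x
  rw [PySem.Set.mem_ofList, mem_valuesA, pv_bridge,
    mem_pvI start end_ (end_ + 1 - 1).toNat 1 PySem.Set.empty x le_rfl le_rfl]
  simp [PySem.Set.empty]
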